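-- pv_equiv track=rewrite | github.com/Owen-Huggins/CS-Projects | CS 1301/HW04.py | highestSum
-- ===== SOURCE A (Python) =====
-- def highestSum(alist):
--     pass
--     mlist = []
--
--     for aStr in alist:
--         add = 0
--         for char in aStr:
--             if char.isdigit():
--                 add += int(char)
--         mlist.append(add)
--     biggest_num = max(mlist)
--     return(mlist.index(biggest_num))
-- ===== SOURCE B (Python) =====
-- def highestSum(alist):
--     # divide-and-conquer tournament over index segments; left wins ties,
--     # so the overall winner is the first index achieving the maximum digit sum
--     def digit_sum(s):
--         return sum(int(char) for char in s if char.isdigit())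
--
--     def tournament(lo, hi):
--         if hi - lo == 1:
--             return (lo, digit_sum(alist[lo]))
--         mid = (lo + hi) // 2
--         li, ls = tournament(lo, mid)
--         ri, rs = tournament(mid, hi)
--         return (ri, rs) if rs > ls else (li, ls)
--
--     if not alist:
--         raise ValueError("highestSum() arg is an empty sequence")
--     return tournament(0, len(alist))[0]
-- ===== Notes on version B (the rewrite author's own statement) =====
-- stated objective: alternative
-- what changed: replaces the build-sums-list / max() / list.index() rescan with a recursive divide-and-conquer tournament over index segments (left branch wins ties, so the first maximal index emerges), instead of any linear scan of a materialized sums list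
import Mathlib
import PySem

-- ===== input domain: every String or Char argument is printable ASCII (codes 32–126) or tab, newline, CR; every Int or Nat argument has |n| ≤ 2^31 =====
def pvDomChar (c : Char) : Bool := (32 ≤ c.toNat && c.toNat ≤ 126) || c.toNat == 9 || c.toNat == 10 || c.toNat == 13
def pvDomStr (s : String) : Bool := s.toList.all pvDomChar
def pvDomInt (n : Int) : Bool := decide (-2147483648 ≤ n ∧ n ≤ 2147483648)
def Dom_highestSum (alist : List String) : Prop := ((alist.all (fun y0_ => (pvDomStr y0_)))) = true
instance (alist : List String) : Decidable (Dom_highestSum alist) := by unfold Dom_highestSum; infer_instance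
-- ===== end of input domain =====

-- B replaces A's build-sums-list / max() / .index() rescan by a divide-and-conquer
-- tournament over index segments (left wins ties), returning the first maximal index.

-- ===== PORT A =====
-- int(ch) for a character with ch.isdigit(): on the ASCII domain this is its digit value
def pvDigitVal (ch : Char) : Int := (ch.toNat : Int) - 48

def highestSum (alist : List String) : Int :=
  let mlist := alist.foldl (fun m aStr =>
    m ++ [aStr.toList.foldl (fun add ch =>
            if PySem.Chars.isdigit ch then add + pvDigitVal ch else add) 0]) []
  match PySem.List.max? mlist (fun x => x) with
  | none => 0      -- max([]) raises ValueError; excluded by Pre_highestSum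
  | some biggest =>
    match PySem.List.index? mlist biggest with
    | none => 0    -- unreachable: biggest is an element of mlist
    | some i => (i : Int)

-- ===== PORT B =====
-- sum(int(char) for char in s if char.isdigit())
def digitSumB (s : String) : Int :=
  ((s.toList.filter (fun ch => PySem.Chars.isdigit ch)).map pvDigitVal).sum

-- tournament(lo, hi): recursive halving; the base guard 'hi ≤ lo + 1' totalizes
-- Python's 'hi - lo == 1' (every reachable call has lo < hi, where they agree);
-- alist[lo] is in range on every reachable call, ported as getD with default "".
def tournB (alist : List String) (lo hi : Nat) : Int × Int :=
  if hi ≤ lo + 1 then ((lo : Int), digitSumB (alist.getD lo ""))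
  else
    let mid := (lo + hi) / 2
    let l := tournB alist lo mid
    let r := tournB alist mid hi
    if l.2 < r.2 then r else l
termination_by hi - lo
decreasing_by all_goals omega

def highestSum_alt (alist : List String) : Int :=
  if alist.isEmpty then 0   -- raise ValueError; excluded by Pre_highestSum
  else (tournB alist 0 alist.length).1

-- ===== PRECONDITION & SPEC =====
-- A (and B) raise ValueError on the empty list; nothing else is excluded.
def Pre_highestSum (alist : List String) : Prop := alist ≠ []
instance (alist : List String) : Decidable (Pre_highestSum alist) := by unfold Pre_highestSum; infer_instance

def pvWitness_highestSum : List String := ["a12", " 9x", "77"]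

def Spec_highestSum (alist : List String) (out : Int) : Prop := out = highestSum_alt alist
instance (alist : List String) (out : Int) : Decidable (Spec_highestSum alist out) := by unfold Spec_highestSum; infer_instance

-- ===== CLAIM (what is proved, stated in full; the proofs are below) =====
def Claim_equal_highestSum : Prop := ∀ (alist : List String), Dom_highestSum alist → Pre_highestSum alist → Spec_highestSum alist (highestSum alist)

-- ===== LEMMAS AND PROOFS =====

-- A's inner character loop computes the filtered digit sum
lemma pvFoldlDigit (cs : List Char) (init : Int) :
    cs.foldl (fun add ch => if PySem.Chars.isdigit ch then add + pvDigitVal ch else add) init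
      = init + ((cs.filter (fun ch => PySem.Chars.isdigit ch)).map pvDigitVal).sum := by
  induction cs generalizing init with
  | nil => simp
  | cons c cs ih =>
    by_cases h : PySem.Chars.isdigit c
    · simp [h, ih]; ring
    · simp [h, ih]

-- the tournament on [lo, hi) returns the FIRST index of maximal digit sum in the segment
lemma pvTournInv (alist : List String) :
    ∀ (n lo hi : Nat), hi - lo ≤ n → lo < hi →
    ∃ j : Nat, tournB alist lo hi = ((j : Int), digitSumB (alist.getD j "")) ∧
      lo ≤ j ∧ j < hi ∧
      (∀ k, lo ≤ k → k < hi → digitSumB (alist.getD k "") ≤ digitSumB (alist.getD j "")) ∧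
      (∀ k, lo ≤ k → k < j → digitSumB (alist.getD k "") < digitSumB (alist.getD j "")) := by
  intro n
  induction n with
  | zero => intro lo hi h1 h2; omega
  | succ n ih =>
    intro lo hi h1 h2
    rw [tournB]
    by_cases hb : hi ≤ lo + 1
    · refine ⟨lo, by simp [hb], le_refl _, h2, ?_, ?_⟩
      · intro k hk1 hk2
        have : k = lo := by omega
        simp [this]
      · intro k hk1 hk2; omega
    · have hmid1 : lo < (lo + hi) / 2 := by omega
      have hmid2 : (lo + hi) / 2 < hi := by omega
      obtain ⟨jl, hel, hl1, hl2, hlmax, hlfirst⟩ := ih lo ((lo + hi) / 2) (by omega) hmid1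
      obtain ⟨jr, her, hr1, hr2, hrmax, hrfirst⟩ := ih ((lo + hi) / 2) hi (by omega) hmid2
      simp only [hb, if_false, hel, her]
      by_cases hlt : digitSumB (alist.getD jl "") < digitSumB (alist.getD jr "")
      · have hc : (((jl : Int), digitSumB (alist.getD jl "")) : Int × Int).2
            < (((jr : Int), digitSumB (alist.getD jr "")) : Int × Int).2 := hlt
        refine ⟨jr, by rw [if_pos hc], by omega, hr2, ?_, ?_⟩
        · intro k hk1 hk2
          by_cases hk : k < (lo + hi) / 2
          · exact le_of_lt (lt_of_le_of_lt (hlmax k hk1 hk) hlt)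
          · exact hrmax k (by omega) hk2
        · intro k hk1 hk2
          by_cases hk : k < (lo + hi) / 2
          · exact lt_of_le_of_lt (hlmax k hk1 hk) hlt
          · exact hrfirst k (by omega) hk2
      · have hc : ¬ (((jl : Int), digitSumB (alist.getD jl "")) : Int × Int).2
            < (((jr : Int), digitSumB (alist.getD jr "")) : Int × Int).2 := hlt
        refine ⟨jl, by rw [if_neg hc], hl1, by omega, ?_, ?_⟩
        · intro k hk1 hk2
          by_cases hk : k < (lo + hi) / 2
          · exact hlmax k hk1 hk
          · exact le_trans (hrmax k (by omega) hk2) (not_lt.mp hlt)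
        · intro k hk1 hk2
          exact hlfirst k hk1 hk2

-- A's outer loop builds the mapped digit-sum list
lemma pvMlist (alist : List String) :
    alist.foldl (fun m aStr =>
      m ++ [aStr.toList.foldl (fun add ch =>
        if PySem.Chars.isdigit ch then add + pvDigitVal ch else add) 0]) []
      = alist.map digitSumB := by
  have : (fun (m : List Int) (aStr : String) =>
      m ++ [aStr.toList.foldl (fun add ch =>
        if PySem.Chars.isdigit ch then add + pvDigitVal ch else add) 0])
      = fun m aStr => m ++ [digitSumB aStr] := by
    funext m aStr
    rw [pvFoldlDigit, digitSumB, zero_add]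
  rw [this, PySem.List.foldl_append_singleton_eq_map]
  simp

-- ===== VERDICT (by name: the statement is the Claim_ definition above) =====
theorem highestSum_spec : Claim_equal_highestSum := by
  intro alist _ hpre
  unfold Spec_highestSum highestSum highestSum_alt
  have hne : alist.isEmpty = false := by
    cases alist with
    | nil => exact absurd rfl hpre
    | cons a t => rfl
  have hlen : 0 < alist.length := by
    cases alist with
    | nil => exact absurd rfl hpre
    | cons a t => simp
  obtain ⟨j, hj, -, hj2, hmax, hfirst⟩ :=
    pvTournInv alist alist.length 0 alist.length (by omega) hlen
  simp only [pvMlist, hne, Bool.false_eq_true, if_false, hj]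
  set sums := alist.map digitSumB with hsums
  have hslen : sums.length = alist.length := by simp [hsums]
  have hsget : ∀ (k : Nat) (hk : k < sums.length), sums[k] = digitSumB (alist.getD k "") := by
    intro k hk
    simp only [hsums, List.getElem_map]
    congr 1
    rw [List.getD_eq_getElem?_getD, List.getElem?_eq_getElem (by omega), Option.getD_some]
  -- max of sums is the digit sum at j
  have hjs : j < sums.length := by omega
  have hjmem : digitSumB (alist.getD j "") ∈ sums := by
    rw [← hsget j hjs]; exact List.getElem_mem hjs
  obtain ⟨M, hM⟩ : ∃ M, PySem.List.max? sums (fun x => x) = some M := by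
    cases hM : PySem.List.max? sums (fun x => x) with
    | none =>
      rw [PySem.List.max?_eq_none_iff] at hM
      exact absurd hM (by simp [hsums]; exact hpre)
    | some M => exact ⟨M, rfl⟩
  have hMeq : M = digitSumB (alist.getD j "") := by
    have h1 : digitSumB (alist.getD j "") ≤ M := PySem.List.max?_isMax hM _ hjmem
    have h2 : M ≤ digitSumB (alist.getD j "") := by
      have hMmem := PySem.List.max?_mem hM
      obtain ⟨k, hk, hkeq⟩ := List.getElem_of_mem hMmem
      rw [← hkeq, hsget k hk]
      exact hmax k (by omega) (by omega)
    omega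
  -- index of that value is j
  have hidx : PySem.List.index? sums (digitSumB (alist.getD j "")) = some j := by
    rw [PySem.List.index?_eq_some_iff]
    refine ⟨sums.take j, sums.drop (j + 1), ?_, ?_, ?_⟩
    · conv_lhs => rw [← List.take_append_drop j sums]
      rw [List.drop_eq_getElem_cons hjs, hsget j hjs]
    · simp [hslen]; omega
    · intro hmem
      obtain ⟨k, hk, hkeq⟩ := List.getElem_of_mem hmem
      have hk' : k < j := by rw [List.length_take] at hk; omega
      have hk3 : k < sums.length := by omega
      have heq : (sums.take j)[k] = sums[k]'hk3 := List.getElem_take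
      rw [heq, hsget k hk3] at hkeq
      have := hfirst k (by omega) hk'
      omega
  simp only [hM, hMeq, hidx]
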